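-- pv_equiv track=rewrite | github.com/HICE-CodingTestStudy/solved | additionalProblem/week55/Emol/BOJ 23611 진심 좌우 반복뛰기.py | solution
-- ===== SOURCE A (Python) =====
-- import sys, math
--
-- def solution(N, K):
--     n = int(math.sqrt(2 * (N - 1) // K))
--     total_distance = K * n * (n + 1) // 2
--
--     while total_distance < N - 1:
--         n += 1
--         total_distance += K * n
--
--     remaining_distance = total_distance - (N - 1)
--
--     if n % 2 == 0:
--         pos = -K * (n // 2) + remaining_distance
--         direction = "L" if remaining_distance > 0 else "R"
--     else:
--         pos = K * ((n + 1) // 2) - remaining_distance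
--         direction = "R" if remaining_distance > 0 else "L"
--
--     return f"{pos} {direction}"
-- ===== SOURCE B (Python) =====
-- def solution(N, K):
--     # Incremental simulation: thread the signed position through the loop
--     # instead of seeding a jump count with math.sqrt and reconstructing pos by parity.
--     n = 0
--     sign = -1          # direction of the last completed jump; jump 1 goes right
--     pos = 0
--     total = 0
--     while total < N - 1:
--         n += 1
--         sign = -sign
--         pos += sign * K * n
--         total += K * n
--     remaining = total - (N - 1)
--     pos -= sign * remaining
--     if remaining > 0:
--         direction = "R" if sign == 1 else "L"
--     else:
--         direction = "L" if sign == 1 else "R"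
--     return f"{pos} {direction}"
-- ===== Notes on version B (the rewrite author's own statement) =====
-- stated objective: simpler
-- what changed: B drops the math.sqrt jump-count estimate and the parity-based position reconstruction, instead simulating the jumps directly from n=0 with a flipping sign, threading the signed position through the loop and stepping back by the overshoot at the end.
-- outside the precondition, e.g. on solution(0, -1): A returns '-1 L', B returns '1 L'; on solution(1, -3): A returns '0 R', B returns '0 R'
import Mathlib
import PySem

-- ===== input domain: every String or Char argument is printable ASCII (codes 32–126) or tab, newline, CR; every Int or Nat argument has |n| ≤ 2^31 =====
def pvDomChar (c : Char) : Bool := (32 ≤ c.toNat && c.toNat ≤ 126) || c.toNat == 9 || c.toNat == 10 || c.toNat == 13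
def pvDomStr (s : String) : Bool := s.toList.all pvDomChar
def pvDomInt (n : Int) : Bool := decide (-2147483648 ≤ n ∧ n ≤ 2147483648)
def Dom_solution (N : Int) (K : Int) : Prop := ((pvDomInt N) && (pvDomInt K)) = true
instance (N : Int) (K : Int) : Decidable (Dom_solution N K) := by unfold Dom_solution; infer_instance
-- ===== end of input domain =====

-- B replaces A's math.sqrt jump-count estimate by a plain incremental simulation that
-- threads the signed position through the loop (objective: simpler; no speed claim).

-- ===== PORT A =====
-- A's `while` loop; Python's loop is unbounded, the fuel Nat.sqrt (2*N).toNat + 2 is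
-- shown sufficient on Pre_ (the loop always stops earlier via its own condition there).
def solutionLoopA (N : Int) (K : Int) : Nat → Int → Int → Int × Int
  | 0, n, total => (n, total)
  | f + 1, n, total =>
    if total < N - 1 then solutionLoopA N K f (n + 1) (total + K * (n + 1))
    else (n, total)

def solution (N : Int) (K : Int) : String :=
  -- int(math.sqrt(m)) = Nat.sqrt m, exact for 0 ≤ m ≤ 2^33 (the whole of Dom ∩ Pre_;
  -- the correctly-rounded double sqrt cannot cross an integer there); Pre_ excludes
  -- m < 0 (ValueError) and K = 0 (ZeroDivisionError). `//` is Int.fdiv (Python floor division).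
  let m : Int := (2 * (N - 1)).fdiv K
  let n0 : Int := (Nat.sqrt m.toNat : Int)
  let t0 : Int := (K * n0 * (n0 + 1)).fdiv 2
  let r := solutionLoopA N K (Nat.sqrt (2 * N).toNat + 2) n0 t0
  let n := r.1
  let rem := r.2 - (N - 1)
  if n % 2 = 0 then
    PySem.Int.toStr (-K * (n.fdiv 2) + rem) ++ " " ++ (if 0 < rem then "L" else "R")
  else
    PySem.Int.toStr (K * ((n + 1).fdiv 2) - rem) ++ " " ++ (if 0 < rem then "R" else "L")

-- ===== PORT B =====
-- state: (n, sign, pos, total); same fuel convention as A's loop.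
def solutionLoopB (N : Int) (K : Int) : Nat → Int × Int × Int × Int → Int × Int × Int × Int
  | 0, s => s
  | f + 1, (n, sign, pos, total) =>
    if total < N - 1 then
      solutionLoopB N K f (n + 1, -sign, pos + (-sign) * K * (n + 1), total + K * (n + 1))
    else (n, sign, pos, total)

def solution_alt (N : Int) (K : Int) : String :=
  let r := solutionLoopB N K (Nat.sqrt (2 * N).toNat + 2) (0, -1, 0, 0)
  let sign := r.2.1
  let rem := r.2.2.2 - (N - 1)
  let pos := r.2.2.1 - sign * rem
  let dir := if 0 < rem then (if sign = 1 then "R" else "L")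
             else (if sign = 1 then "L" else "R")
  PySem.Int.toStr pos ++ " " ++ dir

-- ===== PRECONDITION & SPEC =====
-- Pre_ restricts to the BOJ problem's natural domain N ≥ 1, K ≥ 1: outside it A raises
-- (ValueError from math.sqrt of a negative, ZeroDivisionError for K = 0) or loops forever
-- (K < 0 once the estimate falls short), except a corner N ≤ 1 ∧ K < 0 where A's
-- sqrt-seeded value is accidental and B's simulation does the natural thing.
def Pre_solution (N : Int) (K : Int) : Prop := 1 ≤ N ∧ 1 ≤ K
instance (N : Int) (K : Int) : Decidable (Pre_solution N K) := by unfold Pre_solution; infer_instance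
def pvWitness_solution : Int × Int := (7, 2)

def Spec_solution (N : Int) (K : Int) (out : String) : Prop := out = solution_alt N K
instance (N : Int) (K : Int) (out : String) : Decidable (Spec_solution N K out) := by unfold Spec_solution; infer_instance

-- ===== CLAIM (what is proved, stated in full; the proofs are below) =====
def Claim_equal_solution : Prop := ∀ (N : Int) (K : Int), Dom_solution N K → Pre_solution N K → Spec_solution N K (solution N K)

-- ===== LEMMAS AND PROOFS =====

-- A's loop: from a state with 2*total = K*n*(n+1) it returns the first m ≥ n whose
-- cumulative distance reaches N-1 (fuel ≥ N - n suffices).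
theorem solutionLoopA_spec (N K : Int) (hK : 1 ≤ K) :
    ∀ (f : Nat) (n total : Int), 0 ≤ n → 2 * total = K * n * (n + 1) →
      2 * (N - 1) ≤ K * (n + (f : Int)) * (n + (f : Int) + 1) →
      (let r := solutionLoopA N K f n total
       n ≤ r.1 ∧ 2 * r.2 = K * r.1 * (r.1 + 1) ∧ N - 1 ≤ r.2 ∧
         ∀ j, n ≤ j → j < r.1 → K * j * (j + 1) < 2 * (N - 1)) := by
  intro f
  induction f with
  | zero =>
    intro n total hn ht hf
    simp only [solutionLoopA]
    refine ⟨le_refl _, ht, ?_, fun j h1 h2 => by omega⟩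
    simp only [Nat.cast_zero] at hf
    nlinarith [hf, ht]
  | succ f ih =>
    intro n total hn ht hf
    simp only [solutionLoopA]
    by_cases h : total < N - 1
    · simp only [if_pos h]
      have ht' : 2 * (total + K * (n + 1)) = K * (n + 1) * ((n + 1) + 1) := by nlinarith [ht]
      have := ih (n + 1) (total + K * (n + 1)) (by omega) ht'
        (by push_cast at hf ⊢; linear_combination hf)
      obtain ⟨h1, h2, h3, h4⟩ := this
      refine ⟨by omega, h2, h3, ?_⟩
      intro j hj1 hj2
      rcases eq_or_lt_of_le hj1 with rfl | hlt
      · nlinarith [ht]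
      · exact h4 j (by omega) hj2
    · simp only [if_neg h]
      exact ⟨le_refl _, ht, by omega, fun j h1 h2 => by omega⟩

-- B's loop: same search from 0, with sign and position invariants by parity.
theorem solutionLoopB_spec (N K : Int) (hK : 1 ≤ K) :
    ∀ (f : Nat) (n sign pos total : Int), 0 ≤ n → 2 * total = K * n * (n + 1) →
      (n % 2 = 0 → sign = -1 ∧ 2 * pos = -(K * n)) →
      (n % 2 = 1 → sign = 1 ∧ 2 * pos = K * (n + 1)) →
      2 * (N - 1) ≤ K * (n + (f : Int)) * (n + (f : Int) + 1) →
      (let r := solutionLoopB N K f (n, sign, pos, total)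
       n ≤ r.1 ∧ 2 * r.2.2.2 = K * r.1 * (r.1 + 1) ∧ N - 1 ≤ r.2.2.2 ∧
         (r.1 % 2 = 0 → r.2.1 = -1 ∧ 2 * r.2.2.1 = -(K * r.1)) ∧
         (r.1 % 2 = 1 → r.2.1 = 1 ∧ 2 * r.2.2.1 = K * (r.1 + 1)) ∧
         ∀ j, n ≤ j → j < r.1 → K * j * (j + 1) < 2 * (N - 1)) := by
  intro f
  induction f with
  | zero =>
    intro n sign pos total hn ht he ho hf
    simp only [solutionLoopB]
    refine ⟨le_refl _, ht, ?_, he, ho, fun j h1 h2 => by omega⟩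
    simp only [Nat.cast_zero] at hf
    nlinarith [hf, ht]
  | succ f ih =>
    intro n sign pos total hn ht he ho hf
    simp only [solutionLoopB]
    by_cases h : total < N - 1
    · simp only [if_pos h]
      have ht' : 2 * (total + K * (n + 1)) = K * (n + 1) * ((n + 1) + 1) := by nlinarith [ht]
      have he' : (n + 1) % 2 = 0 → -sign = -1 ∧ 2 * (pos + (-sign) * K * (n + 1)) = -(K * (n + 1)) := by
        intro hp
        obtain ⟨hs, hp2⟩ := ho (by omega)
        subst hs
        constructor
        · norm_num
        · nlinarith [hp2]
      have ho' : (n + 1) % 2 = 1 → -sign = 1 ∧ 2 * (pos + (-sign) * K * (n + 1)) = K * ((n + 1) + 1) := by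
        intro hp
        obtain ⟨hs, hp2⟩ := he (by omega)
        subst hs
        constructor
        · norm_num
        · nlinarith [hp2]
      have := ih (n + 1) (-sign) (pos + (-sign) * K * (n + 1)) (total + K * (n + 1))
        (by omega) ht' he' ho' (by push_cast at hf ⊢; linear_combination hf)
      obtain ⟨h1, h2, h3, h4, h5, h6⟩ := this
      refine ⟨by omega, h2, h3, h4, h5, ?_⟩
      intro j hj1 hj2
      rcases eq_or_lt_of_le hj1 with rfl | hlt
      · nlinarith [ht]
      · exact h6 j (by omega) hj2
    · simp only [if_neg h]
      exact ⟨le_refl _, ht, by omega, he, ho, fun j h1 h2 => by omega⟩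

-- no cumulative distance below the sqrt seed reaches N-1
theorem solution_sqrt_seed (N K : Int) (hN : 1 ≤ N) (hK : 1 ≤ K) :
    ∀ j : Int, 0 ≤ j → j < (Nat.sqrt ((2 * (N - 1)).fdiv K).toNat : Int) →
      K * j * (j + 1) < 2 * (N - 1) := by
  intro j hj hjlt
  have hm0 : 0 ≤ (2 * (N - 1)).fdiv K := Int.fdiv_nonneg (by omega) (by omega)
  have hkm : K * ((2 * (N - 1)).fdiv K) ≤ 2 * (N - 1) := by
    have h1 := Int.fmod_add_mul_fdiv (2 * (N - 1)) K
    have hmod : 0 ≤ (2 * (N - 1)).fmod K := Int.fmod_nonneg (by omega) (by omega)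
    omega
  set m : Int := (2 * (N - 1)).fdiv K with hm
  have hsq : ((Nat.sqrt m.toNat : Int)) * (Nat.sqrt m.toNat : Int) ≤ m := by
    have h := Nat.sqrt_le' m.toNat
    have h2 : ((Nat.sqrt m.toNat : Nat) : Int) * (Nat.sqrt m.toNat : Int) ≤ (m.toNat : Int) := by
      have := (pow_two (Nat.sqrt m.toNat)) ▸ h
      exact_mod_cast this
    omega
  set s : Int := (Nat.sqrt m.toNat : Int) with hs
  have h1 : j + 1 ≤ s := by omega
  have h2 : j * (j + 1) ≤ (s - 1) * s := by nlinarith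
  have h3 : (s - 1) * s ≤ m - 1 := by nlinarith
  have h4 : K * (j * (j + 1)) ≤ K * (m - 1) := mul_le_mul_of_nonneg_left (by omega) (by omega)
  nlinarith

-- ===== VERDICT (by name: the statement is the Claim_ definition above) =====
theorem solution_spec : Claim_equal_solution := by
  unfold Claim_equal_solution
  intro N K _ hPre
  obtain ⟨hN, hK⟩ := hPre
  unfold Spec_solution solution solution_alt
  simp only []
  set m : Int := (2 * (N - 1)).fdiv K with hmdef
  set n0 : Int := (Nat.sqrt m.toNat : Int) with hn0def
  have hn0 : 0 ≤ n0 := by rw [hn0def]; exact Int.natCast_nonneg _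
  have ht0 : 2 * ((K * n0 * (n0 + 1)).fdiv 2) = K * n0 * (n0 + 1) := by
    have hev : Even (n0 * (n0 + 1)) := Int.even_mul_succ_self n0
    obtain ⟨c, hc⟩ := hev
    have h2 : K * n0 * (n0 + 1) = 2 * (K * c) := by rw [mul_assoc, hc]; ring
    rw [h2, Int.mul_fdiv_cancel_left _ (by norm_num)]
  have hsqN : 2 * N < ((Nat.sqrt (2 * N).toNat : Int) + 1) * ((Nat.sqrt (2 * N).toNat : Int) + 1) := by
    have h1 := Nat.lt_succ_sqrt (2 * N).toNat
    have h2 : ((2 * N).toNat : Int) < (((Nat.sqrt (2 * N).toNat + 1) * (Nat.sqrt (2 * N).toNat + 1) : Nat) : Int) := by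
      exact_mod_cast h1
    push_cast at h2
    omega
  have hs0 : (0 : Int) ≤ (Nat.sqrt (2 * N).toNat : Int) := Int.natCast_nonneg _
  have hfuel0 : 2 * (N - 1) ≤ K * (0 + ((Nat.sqrt (2 * N).toNat + 2 : Nat) : Int)) * (0 + ((Nat.sqrt (2 * N).toNat + 2 : Nat) : Int) + 1) := by
    push_cast
    nlinarith [hsqN, hs0]
  have hfuel : 2 * (N - 1) ≤ K * (n0 + ((Nat.sqrt (2 * N).toNat + 2 : Nat) : Int)) * (n0 + ((Nat.sqrt (2 * N).toNat + 2 : Nat) : Int) + 1) := by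
    push_cast at hfuel0 ⊢
    have hFn : (0 : Int) ≤ (Nat.sqrt (2 * N).toNat : Int) + 2 := by omega
    nlinarith [hfuel0, mul_nonneg (by omega : (0:Int) ≤ K) (mul_nonneg hn0 hn0),
      mul_nonneg (by omega : (0:Int) ≤ K) (mul_nonneg hn0 hFn),
      mul_nonneg (by omega : (0:Int) ≤ K) hn0]
  have hA := solutionLoopA_spec N K hK (Nat.sqrt (2 * N).toNat + 2) n0 ((K * n0 * (n0 + 1)).fdiv 2) hn0 ht0 hfuel
  have hB := solutionLoopB_spec N K hK (Nat.sqrt (2 * N).toNat + 2) 0 (-1) 0 0 le_rfl (by ring)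
    (fun _ => ⟨rfl, by ring⟩) (fun h => by omega) hfuel0
  set rA := solutionLoopA N K (Nat.sqrt (2 * N).toNat + 2) n0 ((K * n0 * (n0 + 1)).fdiv 2) with hrA
  set rB := solutionLoopB N K (Nat.sqrt (2 * N).toNat + 2) (0, -1, 0, 0) with hrB
  obtain ⟨hA1, hA2, hA3, hA4⟩ := hA
  obtain ⟨hB1, hB2, hB3, hB4, hB5, hB6⟩ := hB
  have hseed := solution_sqrt_seed N K hN hK
  have hAnn : 0 ≤ rA.1 := le_trans hn0 hA1
  -- the stop indices coincide
  have hneq : rA.1 = rB.1 := by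
    rcases lt_trichotomy rA.1 rB.1 with h | h | h
    · have := hB6 rA.1 hAnn h
      omega
    · exact h
    · rcases lt_or_ge rB.1 n0 with h2 | h2
      · have := hseed rB.1 hB1 (by omega)
        omega
      · have := hA4 rB.1 h2 h
        omega
  have htot : rA.2 = rB.2.2.2 := by
    have := hA2
    rw [hneq] at this
    omega
  -- final assembly: same index, same remaining, same position and direction strings
  rcases (by omega : rA.1 % 2 = 0 ∨ rA.1 % 2 = 1) with hp | hp
  · obtain ⟨hsgn, hpos⟩ := hB4 (by omega)
    rw [if_pos hp, hsgn, htot, hneq]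
    have hposval : -K * (rB.1.fdiv 2) = rB.2.2.1 := by
      have hfd : rB.1.fdiv 2 = rB.1 / 2 := Int.fdiv_eq_ediv_of_nonneg _ (by omega)
      obtain ⟨q, hq⟩ : ∃ q, rB.1 = 2 * q := ⟨rB.1 / 2, by omega⟩
      have hdq : rB.1 / 2 = q := by omega
      have h5 : K * rB.1 = 2 * (K * q) := by rw [hq]; ring
      rw [hfd, hdq]
      linarith [hpos, h5]
    have hL : rB.2.2.1 - -1 * (rB.2.2.2 - (N - 1)) = -K * (rB.1.fdiv 2) + (rB.2.2.2 - (N - 1)) := by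
      rw [hposval]; ring
    rw [hL]
    by_cases hrem : 0 < rB.2.2.2 - (N - 1)
    · rw [if_pos hrem, if_pos hrem]
      norm_num
    · rw [if_neg hrem, if_neg hrem]
      norm_num
  · obtain ⟨hsgn, hpos⟩ := hB5 (by omega)
    rw [if_neg (by omega : ¬ rA.1 % 2 = 0), hsgn, htot, hneq]
    have hposval : K * ((rB.1 + 1).fdiv 2) = rB.2.2.1 := by
      have hfd : (rB.1 + 1).fdiv 2 = (rB.1 + 1) / 2 := Int.fdiv_eq_ediv_of_nonneg _ (by omega)
      obtain ⟨q, hq⟩ : ∃ q, rB.1 + 1 = 2 * q := ⟨(rB.1 + 1) / 2, by omega⟩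
      have hdq : (rB.1 + 1) / 2 = q := by omega
      have h5 : K * (rB.1 + 1) = 2 * (K * q) := by rw [hq]; ring
      rw [hfd, hdq]
      linarith [hpos, h5]
    have hR : rB.2.2.1 - 1 * (rB.2.2.2 - (N - 1)) = K * ((rB.1 + 1).fdiv 2) - (rB.2.2.2 - (N - 1)) := by
      rw [hposval]; ring
    rw [hR]
    by_cases hrem : 0 < rB.2.2.2 - (N - 1)
    · rw [if_pos hrem, if_pos hrem]
      norm_num
    · rw [if_neg hrem, if_neg hrem]
      norm_num
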